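-- pv_equiv track=rewrite | github.com/SumbizAVGNT/process_tracker | src/process_tracker/routes/_deps.py | _match_perm
-- ===== SOURCE A (Python) =====
-- from typing import AsyncGenerator, Iterable, Optional
--
-- def _match_perm(perm: str, granted: Iterable[str]) -> bool:
--     p = (perm or "").strip().lower()
--     g = {x.strip().lower() for x in granted or []}
--     if p in g:
--         return True
--     parts = p.split(".")
--     for i in range(len(parts), 0, -1):
--         star = ".".join(parts[: i - 1] + ["*"]) if i > 1 else "*"
--         if star in g:
--             return True
--     return "admin.*" in g or "*" in g
-- ===== SOURCE B (Python) =====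
-- def _match_perm(perm, granted):
--     p = (perm or "").strip().lower()
--     for x in granted or []:
--         gx = x.strip().lower()
--         if gx == p or gx == "*" or gx == "admin.*":
--             return True
--         if gx.endswith(".*") and p.startswith(gx[:-1]):
--             return True
--     return False
-- ===== Notes on version B (the rewrite author's own statement) =====
-- stated objective: simpler
-- what changed: B drops A's candidate-generation (split the permission, build every wildcard prefix key, look each up in a precomputed set) and instead makes a single pass over the grants, testing each normalized grant directly with one predicate (exact match, '*', 'admin.*', or a '.*' wildcard whose stem-plus-dot is a prefix of the permission).
import Mathlib
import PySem

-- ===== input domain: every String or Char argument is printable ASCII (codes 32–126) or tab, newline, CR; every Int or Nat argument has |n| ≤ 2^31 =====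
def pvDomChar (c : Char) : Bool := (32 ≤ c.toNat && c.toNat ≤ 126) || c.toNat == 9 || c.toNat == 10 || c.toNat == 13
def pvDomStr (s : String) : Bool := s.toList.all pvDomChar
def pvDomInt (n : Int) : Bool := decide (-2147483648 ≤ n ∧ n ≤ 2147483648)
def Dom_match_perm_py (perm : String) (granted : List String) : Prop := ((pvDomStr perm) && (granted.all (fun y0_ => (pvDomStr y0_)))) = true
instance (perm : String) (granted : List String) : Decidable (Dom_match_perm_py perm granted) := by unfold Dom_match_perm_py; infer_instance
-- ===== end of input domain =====

-- B replaces A's generate-wildcard-candidates-and-look-up-in-a-set algorithm by a single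
-- direct scan of the grants with a per-grant predicate (simpler; same return value everywhere).

-- ===== PORT A =====
def match_perm_py (perm : String) (granted : List String) : Bool :=
  let p := PySem.Str.lower (PySem.Str.strip (if perm == "" then "" else perm))
  let g : PySem.Set String :=
    PySem.Set.ofList ((if granted == [] then [] else granted).map
      (fun x => PySem.Str.lower (PySem.Str.strip x)))
  if PySem.Set.contains g p then true
  else
    let parts : List String := (PySem.Str.split? p ".").getD []
    let hit := (PySem.List.pyRange (parts.length : Int) 0 (-1)).foldl
      (fun acc i =>
        let star := if 1 < i then
            PySem.Str.join "." (PySem.List.slice parts none (some (i - 1)) ++ ["*"])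
          else "*"
        if PySem.Set.contains g star then true else acc) false
    if hit then true
    else PySem.Set.contains g "admin.*" || PySem.Set.contains g "*"

-- ===== PORT B =====
def match_perm_py_alt (perm : String) (granted : List String) : Bool :=
  let p := PySem.Str.lower (PySem.Str.strip (if perm == "" then "" else perm))
  (if granted == [] then [] else granted).any (fun x =>
    let gx := PySem.Str.lower (PySem.Str.strip x)
    gx == p || gx == "*" || gx == "admin.*" ||
      (PySem.Str.endswith gx ".*" && PySem.Str.startswith p (PySem.Str.slice gx none (some (-1)))))

-- ===== PRECONDITION & SPEC =====
def Spec_match_perm_py (perm : String) (granted : List String) (out : Bool) : Prop := out = match_perm_py_alt perm granted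
instance (perm : String) (granted : List String) (out : Bool) : Decidable (Spec_match_perm_py perm granted out) := by unfold Spec_match_perm_py; infer_instance

-- ===== CLAIM (what is proved, stated in full; the proofs are below) =====
def Claim_equal_match_perm_py : Prop := ∀ (perm : String) (granted : List String), Dom_match_perm_py perm granted → Spec_match_perm_py perm granted (match_perm_py perm granted)

-- ===== LEMMAS AND PROOFS =====

-- `s or ""` / `xs or []`: the guards in both ports are the identity on their argument
theorem pvIfEmpty (s : String) : (if s == "" then "" else s) = s := by
  by_cases h : s = "" <;> simp [h]

theorem pvIfNil (l : List String) : (if l == [] then [] else l) = l := by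
  by_cases h : l = [] <;> simp [h]

theorem pvIfOr (c x : Bool) : (if c = true then true else x) = (c || x) := by
  cases c <;> simp

theorem pvGo_eq (d : Char) : ∀ (fuel : Nat) (l cur : List Char) (acc : List (List Char)), l.length ≤ fuel →
    PySem.Chars.splitOn.go [d] fuel l cur acc
      = acc.reverse ++ (List.splitOnP (· == d) l).modifyHead (cur.reverse ++ ·) := by
  intro fuel
  induction fuel with
  | zero =>
    intro l cur acc h
    have : l = [] := List.eq_nil_of_length_eq_zero (Nat.le_zero.mp h)
    subst this
    rw [PySem.Chars.splitOn.go.eq_def]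
    simp [List.splitOnP_nil]
  | succ n ih =>
    intro l cur acc h
    cases l with
    | nil =>
      rw [PySem.Chars.splitOn.go.eq_def]
      simp [List.splitOnP_nil]
    | cons c rest =>
      rw [PySem.Chars.splitOn.go.eq_def]
      by_cases hc : c = d
      · subst hc
        have hp : List.isPrefixOf [c] (c :: rest) = true := by
          simp
        simp only [hp, reduceIte, List.length_cons, List.length_nil, Nat.zero_add, List.drop_succ_cons, List.drop_zero]
        rw [ih _ _ _ (by simpa using Nat.le_of_succ_le_succ h)]
        rw [List.splitOnP_cons]
        cases hS : List.splitOnP (· == c) rest with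
        | nil => exact absurd hS (List.splitOnP_ne_nil _ _)
        | cons a t => simp [List.modifyHead]
      · have hp : List.isPrefixOf [d] (c :: rest) = false := by
          simp only [Bool.eq_false_iff, ne_eq, List.isPrefixOf_iff_prefix, List.cons_prefix_cons]
          intro h'; exact absurd h'.1.symm hc
        simp only [hp, Bool.false_eq_true, reduceIte]
        rw [ih _ _ _ (by simpa using Nat.le_of_succ_le_succ h)]
        rw [List.splitOnP_cons]
        cases hS : List.splitOnP (· == d) rest with
        | nil => exact absurd hS (List.splitOnP_ne_nil _ _)
        | cons a t => simp [hc, List.modifyHead]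

theorem pvSplitOn_eq (cs : List Char) (d : Char) :
    PySem.Chars.splitOn cs [d] = List.splitOnP (· == d) cs := by
  rw [PySem.Chars.splitOn, pvGo_eq d (cs.length+1) cs [] [] (by omega)]
  cases hS : List.splitOnP (· == d) cs with
  | nil => exact absurd hS (List.splitOnP_ne_nil _ _)
  | cons a t => simp [List.modifyHead]
theorem pvInter_cons (d : Char) (a b : List Char) (t : List (List Char)) :
    [d].intercalate (a :: b :: t) = a ++ d :: [d].intercalate (b :: t) := by
  simp [List.intercalate]

theorem pvInter_cons_ne (d : Char) (a : List Char) (xs : List (List Char)) (h : xs ≠ []) :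
    [d].intercalate (a :: xs) = a ++ d :: [d].intercalate xs := by
  cases xs with
  | nil => exact absurd rfl h
  | cons b t => exact pvInter_cons d a b t

theorem pvTakeNe {α : Type} (k : Nat) (hk : 1 ≤ k) (a : α) (t : List α) :
    List.take k (a :: t) ≠ [] := by
  cases k with
  | zero => omega
  | succ m => simp

theorem pvInterModHead (d c : Char) (a : List Char) (t : List (List Char)) (k : Nat) (hk : 1 ≤ k) :
    [d].intercalate (List.take k ((c :: a) :: t)) = c :: [d].intercalate (List.take k (a :: t)) := by
  cases k with
  | zero => omega
  | succ m =>
    rw [List.take_succ_cons, List.take_succ_cons]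
    cases hm : List.take m t with
    | nil => simp [List.intercalate]
    | cons b u =>
      rw [pvInter_cons_ne d (c :: a) (b :: u) (by simp), pvInter_cons_ne d a (b :: u) (by simp)]
      simp

theorem pvInter_append_single (d : Char) (a : List Char) :
    ∀ (xs : List (List Char)), xs ≠ [] → [d].intercalate (xs ++ [a]) = [d].intercalate xs ++ d :: a := by
  intro xs
  induction xs with
  | nil => intro h; exact absurd rfl h
  | cons b t ih =>
    intro _
    cases t with
    | nil => simp [List.intercalate]
    | cons c u =>
      rw [List.cons_append, pvInter_cons_ne d b ((c :: u) ++ [a]) (by simp),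
        pvInter_cons d b c u, ih (by simp)]
      simp

theorem pvPrefix_iff (d : Char) : ∀ (cs fs : List Char),
    (fs ++ [d] <+: cs) ↔ ∃ k : Nat, 1 ≤ k ∧ k + 1 ≤ (List.splitOnP (· == d) cs).length ∧
      fs = [d].intercalate ((List.splitOnP (· == d) cs).take k) := by
  intro cs
  induction cs with
  | nil =>
    intro fs
    constructor
    · intro h
      have := h.length_le
      simp at this
    · rintro ⟨k, hk1, hk2, -⟩
      simp [List.splitOnP_nil] at hk2
      omega
  | cons c cs' ih =>
    intro fs
    obtain ⟨a, t, hS⟩ : ∃ a t, List.splitOnP (· == d) cs' = a :: t := by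
      cases hS : List.splitOnP (· == d) cs' with
      | nil => exact absurd hS (List.splitOnP_ne_nil _ _)
      | cons a t => exact ⟨a, t, rfl⟩
    rw [List.splitOnP_cons]
    by_cases hc : c = d
    · subst hc
      simp only [beq_self_eq_true, reduceIte, hS]
      cases fs with
      | nil =>
        constructor
        · intro _
          refine ⟨1, le_refl 1, by simp, by simp [List.intercalate]⟩
        · intro _
          rw [List.nil_append]
          exact ⟨cs', rfl⟩
      | cons e fs' =>
        rw [List.cons_append, List.cons_prefix_cons]
        have ihfs := ih fs'
        rw [hS] at ihfs
        constructor
        · intro ⟨he, h⟩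
          obtain ⟨k', hk1, hk2, hfs⟩ := ihfs.mp h
          refine ⟨k' + 1, by omega, by simpa using hk2, ?_⟩
          rw [List.take_succ_cons,
            pvInter_cons_ne c [] _ (pvTakeNe k' hk1 a t), List.nil_append]
          rw [he, hfs]
        · rintro ⟨k, hk1, hk2, hfs⟩
          cases k with
          | zero => omega
          | succ m =>
            cases m with
            | zero => simp [List.intercalate] at hfs
            | succ m' =>
              rw [List.take_succ_cons,
                pvInter_cons_ne c [] _ (pvTakeNe (m' + 1) (by omega) a t),
                List.nil_append] at hfs
              rw [List.cons_eq_cons] at hfs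
              refine ⟨hfs.1, ihfs.mpr ⟨m' + 1, by omega, by simpa using hk2, hfs.2⟩⟩
    · have hcb : (c == d) = false := by simp [hc]
      simp only [hcb, Bool.false_eq_true, reduceIte, hS, List.modifyHead]
      cases fs with
      | nil =>
        constructor
        · intro h
          rw [List.nil_append] at h
          rcases List.cons_prefix_cons.mp h with ⟨hdc, -⟩
          exact absurd hdc.symm hc
        · rintro ⟨k, hk1, hk2, hfs⟩
          rw [pvInterModHead d c a t k hk1] at hfs
          exact absurd hfs (by simp)
      | cons e fs' =>
        rw [List.cons_append, List.cons_prefix_cons]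
        have ihfs := ih fs'
        rw [hS] at ihfs
        constructor
        · intro ⟨he, h⟩
          obtain ⟨k', hk1, hk2, hfs⟩ := ihfs.mp h
          refine ⟨k', hk1, by simpa using hk2, ?_⟩
          rw [pvInterModHead d c a t k' hk1, he, hfs]
        · rintro ⟨k, hk1, hk2, hfs⟩
          rw [pvInterModHead d c a t k hk1, List.cons_eq_cons] at hfs
          exact ⟨hfs.1, ihfs.mpr ⟨k, hk1, by simpa using hk2, hfs.2⟩⟩

theorem pvParts (p : String) : (PySem.Str.split? p ".").getD []
    = (List.splitOnP (· == '.') p.toList).map String.ofList := by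
  have : ("." : String).toList = ['.'] := by decide
  simp [PySem.Str.split?, PySem.Chars.split?, this, pvSplitOn_eq]

theorem pvStarEq (p : String) (i : Int) (h2 : 2 ≤ i) :
    (PySem.Str.join "." (PySem.List.slice ((PySem.Str.split? p ".").getD []) none (some (i - 1)) ++ ["*"])).toList
    = ['.'].intercalate ((List.splitOnP (· == '.') p.toList).take (i-1).toNat) ++ ['.', '*'] := by
  have h1 : i - 1 = (((i-1).toNat : Nat) : Int) := by omega
  rw [pvParts, h1, PySem.List.slice_to_natCast]
  obtain ⟨a, t, hS⟩ : ∃ a t, List.splitOnP (· == '.') p.toList = a :: t := by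
    cases hS : List.splitOnP (· == '.') p.toList with
    | nil => exact absurd hS (List.splitOnP_ne_nil _ _)
    | cons a t => exact ⟨a, t, rfl⟩
  simp only [PySem.Str.join, PySem.Chars.join, List.map_append,
    String.toList_ofList]
  have h3 : ("*" : String).toList = ['*'] := by decide
  have h4 : ("." : String).toList = ['.'] := by decide
  have h5 : ∀ (X : List (List Char)), List.map String.toList (List.map String.ofList X) = X := by
    intro X
    induction X with
    | nil => simp
    | cons b u ih => simp [ih]
  simp only [h3, h4, List.map_cons, List.map_nil, ← List.map_take, h5, Int.toNat_natCast]
  rw [hS, pvInter_append_single '.' ['*'] _ (pvTakeNe _ (by omega) a t)]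
theorem pvStar_iff (p gx : String) :
    (∃ i ∈ PySem.List.pyRange (((PySem.Str.split? p ".").getD []).length : Int) 0 (-1),
      (if 1 < i then PySem.Str.join "." (PySem.List.slice ((PySem.Str.split? p ".").getD []) none (some (i - 1)) ++ ["*"]) else "*") = gx)
    ↔ (gx = "*" ∨ (PySem.Str.endswith gx ".*" = true ∧ PySem.Str.startswith p (PySem.Str.slice gx none (some (-1))) = true)) := by
  have hlen : (((PySem.Str.split? p ".").getD []).length : Int)
      = ((List.splitOnP (· == '.') p.toList).length : Int) := by
    rw [pvParts]; simp
  have hnpos : 1 ≤ (List.splitOnP (· == '.') p.toList).length := by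
    cases hS : List.splitOnP (· == '.') p.toList with
    | nil => exact absurd hS (List.splitOnP_ne_nil _ _)
    | cons a t => simp
  have hdotstar : (".*" : String).toList = ['.', '*'] := by decide
  constructor
  · rintro ⟨i, hi, heq⟩
    rw [hlen, PySem.List.mem_pyRange_neg_one] at hi
    by_cases h2 : 1 < i
    · right
      rw [if_pos h2] at heq
      have hgl : gx.toList = ['.'].intercalate ((List.splitOnP (· == '.') p.toList).take (i-1).toNat) ++ ['.', '*'] := by
        rw [← heq, pvStarEq p i (by omega)]
      constructor
      · rw [PySem.Str.endswith, hdotstar, PySem.Chars.endswith_iff, hgl]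
        exact List.suffix_append _ _
      · rw [PySem.Str.startswith, PySem.Chars.startswith, List.isPrefixOf_iff_prefix]
        have hdl : (PySem.Str.slice gx none (some (-1))).toList
            = ['.'].intercalate ((List.splitOnP (· == '.') p.toList).take (i-1).toNat) ++ ['.'] := by
          rw [PySem.Str.slice_to_neg_one, hgl]
          rw [show (['.', '*'] : List Char) = ['.'] ++ ['*'] by rfl, ← List.append_assoc]
          exact List.dropLast_concat
        rw [hdl]
        exact (pvPrefix_iff '.' p.toList _).mpr ⟨(i-1).toNat, by omega, by omega, rfl⟩
    · left
      rw [if_neg h2] at heq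
      exact heq.symm
  · rintro (h | ⟨hend, hstart⟩)
    · refine ⟨1, ?_, by simp [h]⟩
      rw [hlen, PySem.List.mem_pyRange_neg_one]
      omega
    · rw [PySem.Str.endswith, hdotstar, PySem.Chars.endswith_iff] at hend
      obtain ⟨Y, hY⟩ := hend
      rw [PySem.Str.startswith, PySem.Chars.startswith, List.isPrefixOf_iff_prefix,
        PySem.Str.slice_to_neg_one, ← hY] at hstart
      rw [show (['.', '*'] : List Char) = ['.'] ++ ['*'] by rfl, ← List.append_assoc,
        List.dropLast_concat] at hstart
      obtain ⟨k, hk1, hk2, hfs⟩ := (pvPrefix_iff '.' p.toList Y).mp hstart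
      refine ⟨(k + 1 : Int), ?_, ?_⟩
      · rw [hlen, PySem.List.mem_pyRange_neg_one]
        omega
      · rw [if_pos (by omega)]
        have := pvStarEq p (k + 1 : Int) (by omega)
        apply String.ext_iff.mpr
        rw [this, ← hY, hfs]
        congr 3
        omega

theorem pvFoldlOr {α : Type} (f : α → Bool) : ∀ (l : List α) (b : Bool),
    List.foldl (fun acc x => f x || acc) b l = (b || l.any f) := by
  intro l
  induction l with
  | nil => intro b; simp
  | cons a t ih =>
    intro b
    rw [List.foldl_cons, ih, List.any_cons]
    cases b <;> cases f a <;> simp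

theorem pvMain (perm : String) (granted : List String) :
    match_perm_py perm granted = match_perm_py_alt perm granted := by
  simp only [match_perm_py, match_perm_py_alt, pvIfEmpty, pvIfNil, pvIfOr]
  rw [pvFoldlOr]
  rw [Bool.eq_iff_iff]
  simp only [Bool.or_eq_true, List.any_eq_true, PySem.Set.contains, List.contains_iff_mem,
    PySem.Set.mem_ofList, List.mem_map, Bool.false_or, beq_iff_eq, Bool.and_eq_true]
  constructor
  · rintro (⟨x, hx, hnx⟩ | ⟨i, hiR, x, hx, hnx⟩ | ⟨x, hx, hnx⟩ | ⟨x, hx, hnx⟩)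
    · exact ⟨x, hx, Or.inl (Or.inl (Or.inl hnx))⟩
    · rcases (pvStar_iff (PySem.Str.lower (PySem.Str.strip perm))
        (PySem.Str.lower (PySem.Str.strip x))).mp ⟨i, hiR, hnx.symm⟩ with h | ⟨h1, h2⟩
      · exact ⟨x, hx, Or.inl (Or.inl (Or.inr h))⟩
      · exact ⟨x, hx, Or.inr ⟨h1, h2⟩⟩
    · exact ⟨x, hx, Or.inl (Or.inr hnx)⟩
    · exact ⟨x, hx, Or.inl (Or.inl (Or.inr hnx))⟩
  · rintro ⟨x, hx, (((h | h) | h) | h)⟩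
    · exact Or.inl ⟨x, hx, h⟩
    · exact Or.inr (Or.inr (Or.inr ⟨x, hx, h⟩))
    · exact Or.inr (Or.inr (Or.inl ⟨x, hx, h⟩))
    · obtain ⟨i, hiR, hst⟩ := (pvStar_iff (PySem.Str.lower (PySem.Str.strip perm))
        (PySem.Str.lower (PySem.Str.strip x))).mpr (Or.inr h)
      exact Or.inr (Or.inl ⟨i, hiR, x, hx, hst.symm⟩)

-- ===== VERDICT (by name: the statement is the Claim_ definition above) =====
theorem match_perm_py_spec : Claim_equal_match_perm_py := by
  intro perm granted _
  unfold Spec_match_perm_py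
  exact pvMain perm granted
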